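-- pv_equiv track=rewrite | github.com/Kinille/Jumbo-Cactpot-Simulation | simulator.py | survivor_data
-- ===== SOURCE A (Python) =====
-- def survivor_data(w_list):
--     s_list = []
--     still_in = len(w_list)
--     s_list.append(still_in)
--     back_index = 0
--     mem_value = 1
--     while back_index < len(w_list):
--         for value in w_list[back_index:]:
--             back_index += 1
--             if value != mem_value:
--                 for i in range(value - mem_value - 1):
--                     s_list.append(still_in)
--                 mem_value = value
--                 s_list.append(still_in)
--             still_in -= 1
--     s_list.append(0)
--     return(s_list)
-- ===== SOURCE B (Python) =====
-- def survivor_data(w_list):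
--     n = len(w_list)
--     # pass 1: running "last emitted value" seen before each position (starts at 1)
--     mems = []
--     m = 1
--     for v in w_list:
--         mems.append(m)
--         if v != m:
--             m = v
--     # pass 2: survivor count at position i is n - i; emit copies wherever the value changed
--     body = [n - i
--             for i, (v, m) in enumerate(zip(w_list, mems)) if v != m
--             for _ in range(max(v - m - 1, 0) + 1)]
--     return [n] + body + [0]
-- ===== Notes on version B (the rewrite author's own statement) =====
-- stated objective: alternative
-- what changed: Replaced A's single pass with a mutable still_in/mem_value/back_index state by two staged passes: a first scan records the running 'last emitted value' before each position, then a flat comprehension over enumerate(zip(...)) derives the survivor count purely from the index as n - i, so no survivor counter is maintained at all.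
import Mathlib
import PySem

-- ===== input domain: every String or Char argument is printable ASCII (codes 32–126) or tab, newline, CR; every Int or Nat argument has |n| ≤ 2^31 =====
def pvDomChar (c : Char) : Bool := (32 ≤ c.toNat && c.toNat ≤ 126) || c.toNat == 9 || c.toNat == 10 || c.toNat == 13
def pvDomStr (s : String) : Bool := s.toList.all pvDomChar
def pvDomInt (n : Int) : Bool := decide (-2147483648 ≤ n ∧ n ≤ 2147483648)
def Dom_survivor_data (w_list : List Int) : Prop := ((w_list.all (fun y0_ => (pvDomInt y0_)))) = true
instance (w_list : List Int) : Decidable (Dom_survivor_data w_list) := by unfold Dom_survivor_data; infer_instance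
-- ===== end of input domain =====

-- B replaces A's single pass over a mutable still_in/mem_value state by two staged passes
-- (a scan of the running mem values, then a flat comprehension deriving the count from the index).

-- ===== PORT A =====
-- A's outer `while` re-enters the `for` over w_list[back_index:] only after the for has
-- consumed everything (back_index is advanced once per element of the slice taken once),
-- so the loop body runs exactly once per element, in order: a single fold is exact.
-- range(value - mem_value - 1) appends that many copies (empty when ≤ 0): List.replicate (·).toNat.
def survivorStepA (st : List Int × Int × Int) (value : Int) : List Int × Int × Int :=
  let (s_list, still_in, mem_value) := st
  if value ≠ mem_value then
    (s_list ++ List.replicate (value - mem_value - 1).toNat still_in ++ [still_in],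
     still_in - 1, value)
  else
    (s_list, still_in - 1, mem_value)

def survivor_data (w_list : List Int) : List Int :=
  (w_list.foldl survivorStepA ([(w_list.length : Int)], (w_list.length : Int), 1)).1 ++ [0]

-- ===== PORT B =====
-- pass 1 of Source B: the running "last emitted value" before each position, seeded with 1.
def memScan : List Int → Int → List Int
  | [], _ => []
  | v :: vs, m => m :: memScan vs (if v ≠ m then v else m)

-- pass 2 of Source B: the flat comprehension `for i,(v,m) in enumerate(zip(w_list, mems)) if v != m
-- for _ in range(max(v-m-1,0)+1)`; carrying i transcribes enumerate.
def buildB (i : Nat) (pairs : List (Int × Int)) (n : Int) : List Int :=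
  match pairs with
  | [] => []
  | (v, m) :: rest =>
    (if v ≠ m then List.replicate ((max (v - m - 1) 0).toNat + 1) (n - i) else []) ++
      buildB (i + 1) rest n

def survivor_data_alt (w_list : List Int) : List Int :=
  let n : Int := w_list.length
  (n :: buildB 0 (w_list.zip (memScan w_list 1)) n) ++ [0]

-- ===== PRECONDITION & SPEC =====
def Spec_survivor_data (w_list : List Int) (out : List Int) : Prop := out = survivor_data_alt w_list
instance (w_list : List Int) (out : List Int) : Decidable (Spec_survivor_data w_list out) := by unfold Spec_survivor_data; infer_instance

-- ===== CLAIM (what is proved, stated in full; the proofs are below) =====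
def Claim_equal_survivor_data : Prop := ∀ (w_list : List Int), Dom_survivor_data w_list → Spec_survivor_data w_list (survivor_data w_list)

-- ===== LEMMAS AND PROOFS =====

-- A's emitted output after the initial [n], written recursively.
def emitA : List Int → Int → Int → List Int
  | [], _, _ => []
  | v :: vs, m, still =>
    (if v ≠ m then List.replicate (v - m - 1).toNat still ++ [still] else []) ++
      emitA vs (if v ≠ m then v else m) (still - 1)

theorem foldA_fst (l : List Int) : ∀ (s : List Int) (still mem : Int),
    (List.foldl survivorStepA (s, still, mem) l).1 = s ++ emitA l mem still := by
  induction l with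
  | nil => intro s still mem; simp [emitA]
  | cons v vs ih =>
    intro s still mem
    simp only [List.foldl_cons, survivorStepA, emitA]
    by_cases h : v = mem
    · subst h; simp [ih]
    · rw [if_pos h, if_pos h, ih]
      simp [h]

theorem emitA_eq_buildB (l : List Int) : ∀ (m : Int) (i : Nat) (n : Int),
    emitA l m (n - i) = buildB i (l.zip (memScan l m)) n := by
  induction l with
  | nil => intro m i n; simp [emitA, memScan, buildB]
  | cons v vs ih =>
    intro m i n
    simp only [emitA, memScan, List.zip_cons_cons, buildB]
    have hstep : n - (i : Int) - 1 = n - ((i + 1 : Nat) : Int) := by push_cast; ring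
    rw [hstep, ih]
    by_cases h : v = m
    · simp [h]
    · have : (v - m - 1).toNat = (max (v - m - 1) 0).toNat := by omega
      simp only [if_pos h, this, ← List.replicate_succ']

-- ===== VERDICT (by name: the statement is the Claim_ definition above) =====
theorem survivor_data_spec : Claim_equal_survivor_data := by
  intro w_list _
  unfold Spec_survivor_data survivor_data survivor_data_alt
  rw [foldA_fst]
  have h0 : ((w_list.length : Int)) = (w_list.length : Int) - ((0 : Nat) : Int) := by simp
  conv_lhs => rw [h0, emitA_eq_buildB]
  simp
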